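-- pv_equiv track=rewrite | github.com/openeuler-mirror/migration-tools | ut-Migration-tools-0.1/centos7/openeuler/centos72openeuler.py | get_disk_info
-- ===== SOURCE A (Python) =====
-- def get_disk_info(string):
--     dev_name = ""
--     part_num = ""
--     length = len(string)
--     for c in range(length - 1, -1, -1):
--         if not string[c].isdigit():
--             if string.find('nvme') != -1:
--                 dev_name = string[0:c]
--                 part_num = string[c + 1:length]
--             else:
--                 dev_name = string[0:c + 1]
--                 part_num = string[c + 1:length]
--             break
--     return dev_name, part_num
-- ===== SOURCE B (Python) =====
-- def get_disk_info(string):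
--     # single forward pass: cut = index just past the last non-digit character
--     cut = 0
--     for i, ch in enumerate(string):
--         if not ch.isdigit():
--             cut = i + 1
--     if cut == 0:
--         return "", ""
--     part_num = string[cut:]
--     dev_name = string[:cut - 1] if 'nvme' in string else string[:cut]
--     return dev_name, part_num
-- ===== Notes on version B (the rewrite author's own statement) =====
-- stated objective: simpler
-- what changed: Replaces A's backward scan with break and slice bookkeeping by a single forward pass over enumerate(string) maintaining the index just past the last non-digit seen, then splits the string once at that index.
import Mathlib
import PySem

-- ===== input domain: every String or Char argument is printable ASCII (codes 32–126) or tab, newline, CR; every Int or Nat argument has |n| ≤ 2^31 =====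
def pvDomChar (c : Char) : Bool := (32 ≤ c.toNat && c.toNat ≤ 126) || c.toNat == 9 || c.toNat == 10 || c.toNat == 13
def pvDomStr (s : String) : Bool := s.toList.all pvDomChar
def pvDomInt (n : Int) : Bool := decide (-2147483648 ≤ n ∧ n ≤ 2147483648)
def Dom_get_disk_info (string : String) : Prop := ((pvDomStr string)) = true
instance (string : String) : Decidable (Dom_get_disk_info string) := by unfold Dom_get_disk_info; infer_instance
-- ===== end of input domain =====

-- B replaces A's backward scan-with-break by a single forward pass over enumerate(string)
-- keeping an accumulator 'cut' (index just past the last non-digit), splitting once at cut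
-- (objective: simpler).

-- ===== PORT A =====
-- the loop 'for c in range(length - 1, -1, -1)' with its break, scanning indices of cs
def getDiskLoop (cs : List Char) : List Int → String × String
  | [] => ("", "")
  | c :: rest =>
    match PySem.List.pyGet? cs c with
    | none => ("", "")  -- unreachable: every index produced by the range is in bounds
    | some ch =>
      if ¬ PySem.Chars.isdigit ch then  -- string[c].isdigit(): isdigit of the one-char string string[c]
        if PySem.Chars.find cs "nvme".toList ≠ -1 then  -- string.find('nvme') != -1
          (String.ofList (PySem.List.slice cs (some 0) (some c)),                       -- string[0:c]
           String.ofList (PySem.List.slice cs (some (c + 1)) (some (cs.length : Int)))) -- string[c+1:length]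
        else
          (String.ofList (PySem.List.slice cs (some 0) (some (c + 1))),                 -- string[0:c+1]
           String.ofList (PySem.List.slice cs (some (c + 1)) (some (cs.length : Int)))) -- string[c+1:length]
      else getDiskLoop cs rest

def get_disk_info (string : String) : String × String :=
  getDiskLoop string.toList (PySem.List.pyRange ((string.toList.length : Int) - 1) (-1) (-1))

-- ===== PORT B =====
def get_disk_info_alt (string : String) : String × String :=
  let cs := string.toList
  -- 'for i, ch in enumerate(string): if not ch.isdigit(): cut = i + 1' as a fold
  let cut : Int := (PySem.List.enumerate cs 0).foldl
      (fun acc p => if ¬ PySem.Chars.isdigit p.2 then p.1 + 1 else acc) 0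
  if cut = 0 then ("", "")   -- 'if cut == 0'
  else
    let part_num := PySem.List.slice cs (some cut) none          -- string[cut:]
    let dev_name := if PySem.Chars.isIn "nvme".toList cs          -- 'nvme' in string
                    then PySem.List.slice cs none (some (cut - 1))  -- string[:cut-1]
                    else PySem.List.slice cs none (some cut)        -- string[:cut]
    (String.ofList dev_name, String.ofList part_num)

-- ===== PRECONDITION & SPEC =====
def Spec_get_disk_info (string : String) (out : String × String) : Prop := out = get_disk_info_alt string
instance (string : String) (out : String × String) : Decidable (Spec_get_disk_info string out) := by unfold Spec_get_disk_info; infer_instance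

-- ===== CLAIM (what is proved, stated in full; the proofs are below) =====
def Claim_equal_get_disk_info : Prop := ∀ (string : String), Dom_get_disk_info string → Spec_get_disk_info string (get_disk_info string)

-- ===== LEMMAS AND PROOFS =====

-- what A's loop computes when started at index n - 1 (having seen only digits at indices ≥ n)
def loopResult (cs : List Char) (n : Nat) : String × String :=
  let stripped := ((cs.take n).reverse.dropWhile (fun c => PySem.Chars.isdigit c)).reverse
  if stripped = [] then ("", "")
  else (String.ofList (if PySem.Chars.find cs "nvme".toList ≠ -1 then stripped.dropLast else stripped),
        String.ofList (cs.drop stripped.length))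

lemma pyRange_down_cons (m : Nat) :
    PySem.List.pyRange (m : Int) (-1) (-1) = (m : Int) :: PySem.List.pyRange ((m : Int) - 1) (-1) (-1) := by
  cases m with
  | zero => decide
  | succ k =>
    have h1 : ((k + 1 : Nat) : Int) - 1 = (k : Int) := by push_cast; ring
    rw [h1]; simp only [PySem.List.pyRange]; norm_num
    have hpos : (-1 : Int) < (k : Int) := by omega
    rw [if_pos hpos]
    have h2 : ((k : Int) + 1 + 1).toNat = k + 2 := by omega
    rw [h2, List.range_succ_eq_map]
    simp only [List.map_cons, List.map_map]
    congr 1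
    apply List.map_congr_left
    intro j _
    simp only [Function.comp_apply]
    push_cast
    ring

lemma loop_spec (cs : List Char) (n : Nat) (hn : n ≤ cs.length) :
    getDiskLoop cs (PySem.List.pyRange ((n : Int) - 1) (-1) (-1)) = loopResult cs n := by
  induction n with
  | zero =>
    have h0 : ((0 : Nat) : Int) - 1 = -1 := by norm_num
    rw [h0, (by decide : PySem.List.pyRange (-1) (-1) (-1) = ([] : List Int))]
    simp [getDiskLoop, loopResult]
  | succ k ih =>
    have hk : k < cs.length := hn
    have h1 : ((k + 1 : Nat) : Int) - 1 = (k : Int) := by push_cast; ring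
    rw [h1, pyRange_down_cons k]
    have hget : PySem.List.pyGet? cs (k : Int) = some cs[k] := by
      simp [PySem.List.pyGet?_natCast, List.getElem?_eq_getElem hk]
    have htake : cs.take (k + 1) = cs.take k ++ [cs[k]] := by
      rw [List.take_add_one, List.getElem?_eq_getElem hk]; rfl
    by_cases hd : PySem.Chars.isdigit cs[k]
    · have hdw : List.dropWhile (fun c => PySem.Chars.isdigit c) (cs.take (k+1)).reverse
           = List.dropWhile (fun c => PySem.Chars.isdigit c) (cs.take k).reverse := by
        rw [htake, List.reverse_append]
        simp [hd]
      have hres : loopResult cs (k + 1) = loopResult cs k := by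
        unfold loopResult
        rw [hdw]
      rw [hres, ← ih (le_of_lt hk)]
      simp only [getDiskLoop, hget, hd, not_true_eq_false, ite_false]
    · simp only [getDiskLoop, hget, hd, Bool.false_eq_true, not_false_eq_true, ite_true]
      have hstr : ((cs.take (k+1)).reverse.dropWhile (fun c => PySem.Chars.isdigit c)) = cs[k] :: (cs.take k).reverse := by
        rw [htake, List.reverse_append]
        simp [hd]
      unfold loopResult
      rw [hstr]
      have hne : ((cs[k] :: (cs.take k).reverse).reverse : List Char) ≠ [] := by
        intro h
        have := congrArg List.length h
        simp at this
        subst this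
        simp at hk
      rw [if_neg hne]
      have hrev : ((cs[k] :: (cs.take k).reverse).reverse : List Char) = cs.take k ++ [cs[k]] := by simp
      have hlen : (cs.take k ++ [cs[k]]).length = k + 1 := by
        simp [List.length_take]
        omega
      have hslice0 : PySem.List.slice cs (some 0) (some ((k:Int))) = cs.take k := by
        simp [PySem.List.slice_natCast]
      have hslice1 : PySem.List.slice cs (some 0) (some ((k:Int) + 1)) = cs.take (k+1) := by
        have := PySem.List.slice_natCast cs 0 (k+1)
        push_cast at this ⊢
        simpa using this
      have hslice2 : PySem.List.slice cs (some ((k:Int) + 1)) (some (cs.length : Int)) = cs.drop (k+1) := by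
        have := PySem.List.slice_natCast cs (k+1) cs.length
        push_cast at this ⊢
        rw [this]
        exact List.take_of_length_le (by simp)
      rw [hrev, hlen, hslice0, hslice1, hslice2, htake]
      by_cases hnv : PySem.Chars.find cs "nvme".toList ≠ -1
      · rw [if_pos hnv, if_pos hnv, List.dropLast_concat]
      · rw [if_neg hnv, if_neg hnv]

-- B's forward fold computes the length of the digit-stripped prefix
lemma cut_eq (cs : List Char) :
    (PySem.List.enumerate cs 0).foldl
        (fun acc p => if ¬ PySem.Chars.isdigit p.2 then p.1 + 1 else acc) 0
      = ((cs.reverse.dropWhile (fun c => PySem.Chars.isdigit c)).length : Int) := by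
  induction cs using List.reverseRecOn with
  | nil => decide
  | append_singleton xs x ih =>
    have hrev : (xs ++ [x]).reverse = x :: xs.reverse := by simp
    rw [PySem.List.enumerate_append, hrev, List.dropWhile_cons, List.foldl_append]
    by_cases hd : PySem.Chars.isdigit x
    · rw [if_pos hd]
      simp only [PySem.List.enumerate, List.foldl_cons, List.foldl_nil, hd, not_true_eq_false,
        ite_false]
      exact ih
    · rw [Bool.not_eq_true] at hd
      simp only [PySem.List.enumerate, List.foldl_cons, List.foldl_nil, hd, Bool.false_eq_true,
        not_false_eq_true, ite_true, ite_false, List.length_cons, List.length_reverse]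
      push_cast
      ring

-- ===== VERDICT (by name: the statement is the Claim_ definition above) =====
theorem get_disk_info_spec : Claim_equal_get_disk_info := by
  unfold Claim_equal_get_disk_info
  intro string _
  unfold Spec_get_disk_info get_disk_info get_disk_info_alt
  rw [loop_spec string.toList string.toList.length le_rfl]
  unfold loopResult
  simp only [List.take_length, cut_eq]
  set cs := string.toList with hcs
  set stripped := (cs.reverse.dropWhile (fun c => PySem.Chars.isdigit c)).reverse with hstr
  have hlen : (cs.reverse.dropWhile (fun c => PySem.Chars.isdigit c)).length = stripped.length := by
    rw [hstr, List.length_reverse]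
  rw [hlen]
  have hsplit : cs = stripped ++ (cs.reverse.takeWhile (fun c => PySem.Chars.isdigit c)).reverse := by
    rw [hstr, ← List.reverse_append, List.takeWhile_append_dropWhile, List.reverse_reverse]
  have hcond : (PySem.Chars.find cs "nvme".toList ≠ -1)
      ↔ (PySem.Chars.isIn "nvme".toList cs = true) := by
    rw [PySem.Chars.isIn_iff_infix]
    have h := PySem.Chars.find_eq_neg_one_iff cs "nvme".toList
    constructor
    · intro hne; by_contra hni; exact hne (h.mpr hni)
    · intro hi hne; exact (h.mp hne) hi
  by_cases h0 : stripped = ([] : List Char)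
  · rw [if_pos h0, if_pos (by simp [h0])]
  · have hlpos : 0 < stripped.length := List.length_pos_iff.mpr h0
    rw [if_neg h0, if_neg (show ¬((stripped.length : Nat) : Int) = 0 by omega)]
    have hdrop : PySem.List.slice cs (some ((stripped.length : Nat) : Int)) none
        = cs.drop stripped.length := PySem.List.slice_from_natCast cs stripped.length
    have htake : PySem.List.slice cs none (some ((stripped.length : Nat) : Int))
        = cs.take stripped.length := PySem.List.slice_to_natCast cs stripped.length
    have htakeL : cs.take stripped.length = stripped := by
      conv_lhs => rw [hsplit]
      simp
    have hsub : ((stripped.length : Nat) : Int) - 1 = ((stripped.length - 1 : Nat) : Int) := by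
      omega
    have htake1 : PySem.List.slice cs none (some (((stripped.length : Nat) : Int) - 1))
        = stripped.dropLast := by
      rw [hsub, PySem.List.slice_to_natCast]
      conv_lhs => rw [hsplit]
      rw [List.take_append_of_le_length (by omega), List.dropLast_eq_take]
    rw [hdrop, htake, htakeL, htake1]
    by_cases hnv : PySem.Chars.find cs "nvme".toList ≠ -1
    · rw [if_pos hnv, if_pos (hcond.mp hnv)]
    · rw [if_neg hnv, if_neg (fun hi => hnv (hcond.mpr hi))]
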